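-- pv_equiv track=rewrite | github.com/jliao1/PythonStudy | LeetCode/String/Palindrome Data Stream给定字母能否组成回文串.py | getStream2
-- ===== SOURCE A (Python) =====
-- def getStream2(s):
--     if s is None:
--         return []
--
--     res = []
--
--     # 需要数出现次数为奇数的字母，那就需要一个字母表 (需要有一个 对每个字母出现次数的 计数)
--     alphabet = [0] * 26  # 开一个长度为26的初始值为0的这么一个list
--     # index 0 代表a，1代表b…… 25代表z
--
--     count = 0  # 还需要一个计数
--     for i in range(len(s)):  # 开始读了
--         # 记录当前扫到的 每一个字母, 目前出现了多少次
--         alphabet[ord(s[i]) - ord('a')] += 1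
--
--         # 如果出现的次数已经为奇数, count +1
--         if alphabet[ord(s[i]) - ord('a')] % 2 == 1:
--             count += 1
--         else: # 如果是偶数, count -1
--             count -= 1
--
--         # 利用回文串性质，如果 出现次数为奇书的 字母个数<=1才是回文串，不然就不是汇文串
--         if count > 1:
--             res.append(0)
--         else:
--             res.append(1)
--     return res
-- ===== SOURCE B (Python) =====
-- def getStream2(s):
--     if s is None:
--         return []
--     res = []
--     mask = 0
--     for ch in s:
--         mask ^= 1 << (ord(ch) - ord('a'))
--         res.append(1 if mask & (mask - 1) == 0 else 0)
--     return res
-- ===== Notes on version B (the rewrite author's own statement) =====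
-- stated objective: idiomatic
-- what changed: Replaces the 26-slot count array plus odd-counter with a single integer bitmask: each char toggles its bit and the at-most-one-odd-letter test becomes the classic mask & (mask - 1) == 0 check.
-- outside the precondition, e.g. on getStream2('`'): A returns [1], B raises ValueError; on getStream2('G'): A returns [1], B raises ValueError
import Mathlib
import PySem

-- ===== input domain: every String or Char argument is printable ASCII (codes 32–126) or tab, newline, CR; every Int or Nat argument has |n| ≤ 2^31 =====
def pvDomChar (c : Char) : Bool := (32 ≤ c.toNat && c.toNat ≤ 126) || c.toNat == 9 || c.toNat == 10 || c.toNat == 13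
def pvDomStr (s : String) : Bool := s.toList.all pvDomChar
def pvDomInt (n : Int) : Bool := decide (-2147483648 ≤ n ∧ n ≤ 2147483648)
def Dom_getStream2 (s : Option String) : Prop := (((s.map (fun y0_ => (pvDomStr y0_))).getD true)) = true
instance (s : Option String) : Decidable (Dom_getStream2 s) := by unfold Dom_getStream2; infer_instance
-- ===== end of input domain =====

-- B replaces A's 26-slot count array plus odd-counter with a single bitmask and the mask & (mask-1) == 0 test (idiomatic, same cost).


-- ===== PORT A =====
-- one iteration of A's for-loop: state (alphabet, count, res); the Python loop
-- 'for i in range(len(s))' reads s[i] in order, i.e. it visits the chars left to right.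
def pvStepA (st : List Int × Int × List Int) (c : Char) : List Int × Int × List Int :=
  let alphabet := st.1
  let count := st.2.1
  let res := st.2.2
  let idx : Int := (c.toNat : Int) - 97                                   -- ord(s[i]) - ord('a')
  let alphabet' := PySem.List.pySetD alphabet idx (PySem.List.pyGetD alphabet idx 0 + 1)  -- alphabet[...] += 1
  let count' := if PySem.Int.mod (PySem.List.pyGetD alphabet' idx 0) 2 = 1 then count + 1 else count - 1
  (alphabet', count', res ++ [if count' > 1 then (0 : Int) else 1])

def getStream2 (s : Option String) : List Int :=
  match s with
  | none => []
  | some t => (t.toList.foldl pvStepA (List.replicate 26 0, 0, [])).2.2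

-- ===== PORT B =====
-- one iteration of B's loop: state (mask, res).
-- the Nat shift amount c.toNat - 97 in 1 << (ord(ch) - ord(a)) is exact for chars of code at least 97
-- (Pre_ guarantees this; below code 97 Python raises ValueError, which Pre_ excludes).
def pvStepB (st : Int × List Int) (c : Char) : Int × List Int :=
  let mask := PySem.Int.bxor st.1 ((1 : Int) <<< (c.toNat - 97))
  (mask, st.2 ++ [if PySem.Int.band mask (mask - 1) = 0 then (1 : Int) else 0])

def getStream2_alt (s : Option String) : List Int :=
  match s with
  | none => []
  | some t => (t.toList.foldl pvStepB (0, [])).2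

-- ===== PRECONDITION & SPEC =====
-- Pre_ excludes strings with any char outside lowercase a..z (codes 97..122): above code 122 A raises
-- IndexError; for chars in codes 71..96 A returns a value only through accidental negative-index wraparound
-- into the 26-slot array, and B's own algorithm raises ValueError there (negative shift); below code 71 A raises IndexError.
def Pre_getStream2 (s : Option String) : Prop :=
  ((s.map (fun t => t.toList.all (fun c => 97 ≤ c.toNat && c.toNat ≤ 122))).getD true) = true
instance (s : Option String) : Decidable (Pre_getStream2 s) := by unfold Pre_getStream2; infer_instance

def pvWitness_getStream2 : Option String := some "abacabz"

def Spec_getStream2 (s : Option String) (out : List Int) : Prop := out = getStream2_alt s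
instance (s : Option String) (out : List Int) : Decidable (Spec_getStream2 s out) := by unfold Spec_getStream2; infer_instance

-- ===== CLAIM (what is proved, stated in full; the proofs are below) =====
def Claim_equal_getStream2 : Prop := ∀ (s : Option String), Dom_getStream2 s → Pre_getStream2 s → Spec_getStream2 s (getStream2 s)
-- ===== LEMMAS AND PROOFS =====

-- The invariant tying A's state (alphabet, count) to B's mask after any common prefix:
-- bit j of the mask is the parity of alphabet[j], and count is the number of set bits.
def pvInv (alphabet : List Int) (count mask : Int) : Prop :=
  alphabet.length = 26 ∧ 0 ≤ mask ∧
  (∀ j, mask.toNat.testBit j = decide ((alphabet.getD j 0) % 2 = 1)) ∧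
  count = (((Finset.range 26).filter (fun j => mask.toNat.testBit j)).card : Int)

-- bits of m-1 above a set bit agree with m's
theorem pv_testBit_sub_one_high (m a b : Nat) (ha : m.testBit a = true) (hab : a < b) :
    (m - 1).testBit b = m.testBit b := by
  set i := a + 1 with hi
  have hr : 2 ^ a ≤ m % 2 ^ i := by
    apply Nat.ge_two_pow_of_testBit (i := a)
    simp [Nat.testBit_mod_two_pow, hi, ha]
  have hmod : m % 2 ^ i < 2 ^ i := Nat.mod_lt _ (by positivity)
  have hm : m = 2 ^ i * (m / 2 ^ i) + m % 2 ^ i := (Nat.div_add_mod m (2 ^ i)).symm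
  have hpos : 1 ≤ m % 2 ^ i := le_trans Nat.one_le_two_pow hr
  have hm1 : m - 1 = 2 ^ i * (m / 2 ^ i) + (m % 2 ^ i - 1) := by omega
  rw [hm1, Nat.testBit_two_pow_mul_add _ (by omega), if_neg (by omega)]
  conv_rhs => rw [hm]
  rw [Nat.testBit_two_pow_mul_add _ hmod, if_neg (by omega)]

-- "at most one set bit" is exactly the m & (m-1) == 0 test
theorem pv_card_le_one_iff_and (m : Nat) (hhi : ∀ j, 26 ≤ j → m.testBit j = false) :
    (((Finset.range 26).filter (fun j => m.testBit j)).card ≤ 1) ↔ (m &&& (m - 1) = 0) := by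
  constructor
  · intro h
    interval_cases hcard : ((Finset.range 26).filter (fun j => m.testBit j)).card
    · have hempty : (Finset.range 26).filter (fun j => m.testBit j) = ∅ := Finset.card_eq_zero.mp hcard
      have hm0 : m = 0 := by
        apply Nat.eq_of_testBit_eq
        intro j
        simp only [Nat.zero_testBit]
        by_cases hj : j < 26
        · by_contra hb
          have : j ∈ (Finset.range 26).filter (fun j => m.testBit j) := by
            simp [Finset.mem_filter, hj]
            simpa using hb
          simp [hempty] at this
        · exact hhi j (by omega)
      simp [hm0]
    · obtain ⟨k, hk⟩ := Finset.card_eq_one.mp hcard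
      have hmem_iff : ∀ j, m.testBit j = true ↔ j = k := by
        intro j
        constructor
        · intro hb
          by_cases hj : j < 26
          · have : j ∈ ({k} : Finset ℕ) := by rw [← hk]; simp [hj, hb]
            simpa using this
          · rw [hhi j (by omega)] at hb; cases hb
        · intro hj
          subst hj
          have : j ∈ (Finset.range 26).filter (fun i => m.testBit i) := by rw [hk]; simp
          exact (Finset.mem_filter.mp this).2
      have hmpow : m = 2 ^ k := by
        apply Nat.eq_of_testBit_eq
        intro j
        rw [Nat.testBit_two_pow]
        rcases h' : m.testBit j with _ | _
        · symm
          simp only [decide_eq_false_iff_not]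
          intro hkj
          rw [← hkj] at h'
          have := (hmem_iff k).mpr rfl
          rw [h'] at this
          exact Bool.false_ne_true this
        · simp [(hmem_iff j).mp h']
      subst hmpow
      apply Nat.eq_of_testBit_eq
      intro j
      rw [Nat.testBit_and, Nat.testBit_two_pow, Nat.testBit_two_pow_sub_one, Nat.zero_testBit]
      by_cases hkj : k = j
      · subst hkj; simp
      · simp [hkj]
  · intro h
    by_contra hc
    rw [not_le] at hc
    obtain ⟨a, b, ha, hb, hab⟩ := Finset.one_lt_card_iff.mp hc
    have hta : m.testBit a = true := (Finset.mem_filter.mp ha).2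
    have htb : m.testBit b = true := (Finset.mem_filter.mp hb).2
    rcases Nat.lt_or_ge a b with hlt | hge
    · have h1 : (m - 1).testBit b = true := by rw [pv_testBit_sub_one_high m a b hta hlt]; exact htb
      have : (m &&& (m - 1)).testBit b = true := by rw [Nat.testBit_and, htb, h1]; rfl
      rw [h, Nat.zero_testBit] at this
      exact Bool.false_ne_true this
    · have hlt : b < a := by omega
      have h1 : (m - 1).testBit a = true := by rw [pv_testBit_sub_one_high m b a htb hlt]; exact hta
      have : (m &&& (m - 1)).testBit a = true := by rw [Nat.testBit_and, hta, h1]; rfl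
      rw [h, Nat.zero_testBit] at this
      exact Bool.false_ne_true this

-- band ↑m (↑m - 1) over Int is the Nat m &&& (m-1)
theorem pv_band_pred (m : Nat) : PySem.Int.band (m : Int) ((m : Int) - 1) = ((m &&& (m - 1) : Nat) : Int) := by
  cases m with
  | zero => simp [PySem.Int.band_neg_one]
  | succ n =>
    have : ((n + 1 : Nat) : Int) - 1 = (n : Int) := by push_cast; ring
    rw [this, PySem.Int.band_natCast]
    simp

-- the joint step: the invariant is preserved and both loops append the same digit
theorem pv_step (c : Char) (hc : 97 ≤ c.toNat ∧ c.toNat ≤ 122)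
    (alphabet : List Int) (count mask : Int) (resA resB : List Int)
    (h : pvInv alphabet count mask) (hres : resA = resB) :
    pvInv (pvStepA (alphabet, count, resA) c).1 (pvStepA (alphabet, count, resA) c).2.1
      (pvStepB (mask, resB) c).1 ∧
    (pvStepA (alphabet, count, resA) c).2.2 = (pvStepB (mask, resB) c).2 := by
  obtain ⟨hlen, hm0, hbits, hcount⟩ := h
  set j : Nat := c.toNat - 97 with hj
  have hj26 : j < 26 := by omega
  have hidx : ((c.toNat : Int) - 97) = (j : Int) := by omega
  set m : Nat := mask.toNat with hmdef
  have hmask : mask = (m : Int) := by omega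
  -- A's new array and cell value
  set v : Int := alphabet.getD j 0 + 1 with hv
  have hsetA : pvStepA (alphabet, count, resA) c =
      (alphabet.set j v, (if (v % 2 = 1) then count + 1 else count - 1),
       resA ++ [if (if (v % 2 = 1) then count + 1 else count - 1) > 1 then (0 : Int) else 1]) := by
    show (_, _, _) = _
    simp only [hidx, PySem.List.pySetD_natCast, PySem.List.pyGetD_natCast]
    have hget : (alphabet.set j v).getD j 0 = v := by
      rw [List.getD_eq_getElem _ _ (by simp [hlen]; omega)]
      simp
    rw [hget, PySem.Int.mod_eq_emod_of_pos (by norm_num)]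
  -- B's new mask
  set m' : Nat := m ^^^ 2 ^ j with hm'
  have hshift : (1 : Int) <<< j = ((2 ^ j : Nat) : Int) := by simp [Int.shiftLeft_eq]
  have hsetB : pvStepB (mask, resB) c =
      ((m' : Int), resB ++ [if PySem.Int.band (m' : Int) ((m' : Int) - 1) = 0 then (1 : Int) else 0]) := by
    show (_, _) = _
    simp only [← hj, hmask, hshift, PySem.Int.bxor_natCast, ← hm']
  -- bit parity correspondence for the new state
  have hbits' : ∀ i, m'.testBit i = decide (((alphabet.set j v).getD i 0) % 2 = 1) := by
    intro i
    rw [hm', Nat.testBit_xor, Nat.testBit_two_pow]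
    by_cases hij : i = j
    · rw [hij]
      have hgets : (alphabet.set j v).getD j 0 = v := by
        rw [List.getD_eq_getElem _ _ (by simp [hlen]; omega)]
        simp
      rw [hgets, hbits j]
      rcases Int.emod_two_eq_zero_or_one (alphabet.getD j 0) with hpar | hpar
      · have h1 : v % 2 = 1 := by rw [hv]; omega
        rw [hpar, h1]
        simp
      · have h1 : v % 2 = 0 := by rw [hv]; omega
        rw [hpar, h1]
        simp
    · have hgets : (alphabet.set j v).getD i 0 = alphabet.getD i 0 := by
        by_cases hilen : i < 26
        · rw [List.getD_eq_getElem _ _ (by simp [hlen]; omega),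
              List.getD_eq_getElem _ _ (by omega)]
          exact List.getElem_set_ne (by omega) _
        · rw [List.getD_eq_default _ _ (by simp [hlen]; omega), List.getD_eq_default _ _ (by omega)]
      rw [hgets, hbits i]
      have hd : decide (j = i) = false := by
        simp only [decide_eq_false_iff_not]
        exact fun h => hij h.symm
      rw [hd, Bool.xor_false]
  -- the filter set gains or loses exactly j
  have hSet : ((Finset.range 26).filter (fun i => m'.testBit i)) =
      (if m.testBit j then ((Finset.range 26).filter (fun i => m.testBit i)).erase j
       else insert j ((Finset.range 26).filter (fun i => m.testBit i))) := by
    by_cases hjb : m.testBit j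
    · rw [if_pos hjb]
      ext i
      by_cases hij : i = j
      · subst hij
        simp [Finset.mem_erase, hm', Nat.testBit_xor, Nat.testBit_two_pow, hjb]
      · simp [Finset.mem_erase, hij, hm', Nat.testBit_xor, Nat.testBit_two_pow, Ne.symm hij]
    · rw [if_neg hjb]
      ext i
      by_cases hij : i = j
      · subst hij
        simp [hm', Nat.testBit_xor, Nat.testBit_two_pow, hjb, hj26]
      · simp [Finset.mem_insert, hij, hm', Nat.testBit_xor, Nat.testBit_two_pow, Ne.symm hij]
  -- new parity at j decides both the count update and the bit direction
  have hparj : (v % 2 = 1) ↔ m'.testBit j = true := by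
    rw [hbits' j]
    have hgets : (alphabet.set j v).getD j 0 = v := by
      rw [List.getD_eq_getElem _ _ (by simp [hlen]; omega)]
      simp
    rw [hgets]
    simp
  have hjold : m.testBit j = decide ((alphabet.getD j 0) % 2 = 1) := hbits j
  have hcount' : (if (v % 2 = 1) then count + 1 else count - 1) =
      (((Finset.range 26).filter (fun i => m'.testBit i)).card : Int) := by
    by_cases hpar : v % 2 = 1
    · have hjnew : m'.testBit j = true := hparj.mp hpar
      have hjoldf : m.testBit j = false := by
        rw [hjold]
        have : ¬ ((alphabet.getD j 0) % 2 = 1) := by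
          rcases Int.emod_two_eq_zero_or_one (alphabet.getD j 0) with h0 | h0
          · omega
          · exfalso; rw [hv] at hpar; omega
        simpa using this
      rw [if_pos hpar, hSet, if_neg (by simp [hjoldf])]
      rw [Finset.card_insert_of_notMem (by simp [hjoldf])]
      rw [hcount]; push_cast; ring
    · have hjnew : m'.testBit j = false := by
        rcases h' : m'.testBit j with _ | _
        · rfl
        · exact absurd (hparj.mpr h') hpar
      have hjoldt : m.testBit j = true := by
        rw [hjold]
        have : (alphabet.getD j 0) % 2 = 1 := by
          rcases Int.emod_two_eq_zero_or_one (alphabet.getD j 0) with h0 | h0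
          · exfalso; apply hpar; rw [hv]; omega
          · exact h0
        simpa using this
      rw [if_neg hpar, hSet, if_pos hjoldt]
      rw [Finset.card_erase_of_mem (by simp [hjoldt, hj26])]
      rw [hcount]
      have hmem : j ∈ (Finset.range 26).filter (fun i => m.testBit i) := by simp [hjoldt, hj26]
      have hpos : 1 ≤ ((Finset.range 26).filter (fun i => m.testBit i)).card :=
        Finset.card_pos.mpr ⟨j, hmem⟩
      push_cast [Nat.cast_sub hpos]
      ring
  -- both appended digits agree
  have hhi' : ∀ i, 26 ≤ i → m'.testBit i = false := by
    intro i hi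
    rw [hbits' i, List.getD_eq_default _ _ (by simp [hlen]; omega)]
    norm_num
  have hdigit : (if (if (v % 2 = 1) then count + 1 else count - 1) > 1 then (0 : Int) else 1) =
      (if PySem.Int.band (m' : Int) ((m' : Int) - 1) = 0 then (1 : Int) else 0) := by
    rw [hcount', pv_band_pred m']
    have hiff := pv_card_le_one_iff_and m' hhi'
    by_cases hle : ((Finset.range 26).filter (fun i => m'.testBit i)).card ≤ 1
    · rw [if_neg (by exact_mod_cast by omega), if_pos (by exact_mod_cast hiff.mp hle)]
    · rw [if_pos (by exact_mod_cast by omega)]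
      rw [if_neg]
      intro hand
      have : (m' &&& (m' - 1) : Nat) = 0 := by exact_mod_cast hand
      exact hle (hiff.mpr this)
  refine ⟨⟨?_, ?_, ?_, ?_⟩, ?_⟩
  · rw [hsetA]; simp [hlen]
  · rw [hsetB]; positivity
  · rw [hsetA, hsetB]
    simpa using hbits'
  · rw [hsetA, hsetB]
    simpa using hcount'
  · rw [hsetA, hsetB]
    simp only []
    rw [hres, hdigit]

-- the two loops produce the same output list from related states
theorem pv_loop (cs : List Char) : ∀ (alphabet : List Int) (count mask : Int) (resA resB : List Int),
    (∀ c ∈ cs, 97 ≤ c.toNat ∧ c.toNat ≤ 122) → pvInv alphabet count mask → resA = resB →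
    (cs.foldl pvStepA (alphabet, count, resA)).2.2 = (cs.foldl pvStepB (mask, resB)).2 := by
  induction cs with
  | nil => intro _ _ _ _ _ _ _ hres; simpa using hres
  | cons c cs ih =>
    intro alphabet count mask resA resB hcs hinv hres
    have hc := hcs c (by simp)
    obtain ⟨hinv', hres'⟩ := pv_step c hc alphabet count mask resA resB hinv hres
    simp only [List.foldl_cons]
    have hA : pvStepA (alphabet, count, resA) c =
        ((pvStepA (alphabet, count, resA) c).1, (pvStepA (alphabet, count, resA) c).2.1,
         (pvStepA (alphabet, count, resA) c).2.2) := rfl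
    have hB : pvStepB (mask, resB) c =
        ((pvStepB (mask, resB) c).1, (pvStepB (mask, resB) c).2) := rfl
    rw [hA, hB]
    exact ih _ _ _ _ _ (fun d hd => hcs d (by simp [hd])) hinv' hres'

theorem pv_inv_init : pvInv (List.replicate 26 0) 0 0 := by
  refine ⟨by simp, le_refl 0, ?_, by simp⟩
  intro j
  have h0 : (List.replicate 26 (0 : Int)).getD j 0 = 0 := by
    by_cases hj : j < 26
    · rw [List.getD_eq_getElem _ _ (by simpa using hj), List.getElem_replicate]
    · rw [List.getD_eq_default _ _ (by simpa using hj)]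
  rw [h0]
  simp

-- ===== VERDICT (by name: the statement is the Claim_ definition above) =====
theorem getStream2_spec : Claim_equal_getStream2 := by
  unfold Claim_equal_getStream2
  intro s _ hpre
  unfold Spec_getStream2
  cases s with
  | none => rfl
  | some t =>
    unfold getStream2 getStream2_alt
    apply pv_loop
    · intro c hc
      unfold Pre_getStream2 at hpre
      simp only [Option.map_some, Option.getD_some, List.all_eq_true] at hpre
      have := hpre c hc
      simpa using this
    · exact pv_inv_init
    · rfl
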